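-- pv_equiv track=rewrite | github.com/chemouna/AlgorithmsDesignManual | AlgorithmsDesignManual-python/com/mounacheikhna/adm/chapter3/Exercice1.py | isParenValid
-- ===== SOURCE A (Python) =====
-- def isParenValid(s):
--     stack, opened, closed = [], '(', ')'
--     for i, c in enumerate(s):
--         if c in opened:
--             stack.append((c, i))
--         elif c in closed:
--             if not stack or stack.pop()[0] != '(':
--                 return False, i
--     return (True, -1) if not stack else (False, stack[0][1])
-- ===== SOURCE B (Python) =====
-- def isParenValid(s):
--     balance, base = 0, -1
--     for i, c in enumerate(s):
--         if c in '(':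
--             if balance == 0:
--                 base = i
--             balance += 1
--         elif c in ')':
--             if balance == 0:
--                 return False, i
--             balance -= 1
--     return (True, -1) if balance == 0 else (False, base)
-- ===== Notes on version B (the rewrite author's own statement) =====
-- stated objective: simpler
-- what changed: Replaces the list-of-(char,index) stack with two scalars: a nesting-depth counter and the index of the outermost currently-open paren recorded when the depth is 0, so no container is kept at all.
import Mathlib
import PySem

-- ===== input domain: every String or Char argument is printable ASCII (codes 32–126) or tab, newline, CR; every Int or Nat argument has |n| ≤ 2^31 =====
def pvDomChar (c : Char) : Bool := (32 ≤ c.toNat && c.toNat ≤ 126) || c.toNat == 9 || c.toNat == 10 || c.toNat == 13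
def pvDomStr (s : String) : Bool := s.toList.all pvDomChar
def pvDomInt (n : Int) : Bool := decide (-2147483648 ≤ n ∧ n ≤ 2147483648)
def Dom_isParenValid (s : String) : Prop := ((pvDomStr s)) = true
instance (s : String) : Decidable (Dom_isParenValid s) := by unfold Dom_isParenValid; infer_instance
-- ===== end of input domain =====

-- B replaces A's stack of (char, index) pairs with a depth counter plus the index of the
-- outermost open paren (recorded when depth is 0); return values are proved identical.

-- ===== PORT A =====
-- loop of A: state is the stack (appended at the end, popped from the end, stack[0] is the head)
def isParenValidGoA : List Char → Int → List (Char × Int) → Bool × Int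
  | [], _, st =>
    match st with
    | [] => (true, -1)
    | (_, j) :: _ => (false, j)
  | c :: cs, i, st =>
    if c = '(' then
      isParenValidGoA cs (i + 1) (st ++ [(c, i)])
    else if c = ')' then
      match st.getLast? with
      | none => (false, i)
      | some p => if p.1 ≠ '(' then (false, i) else isParenValidGoA cs (i + 1) st.dropLast
    else
      isParenValidGoA cs (i + 1) st

def isParenValid (s : String) : Bool × Int :=
  isParenValidGoA s.toList 0 []

-- ===== PORT B =====
-- loop of B: state is (balance, base)
def isParenValidGoB : List Char → Int → Int → Int → Bool × Int
  | [], _, bal, base => if bal = 0 then (true, -1) else (false, base)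
  | c :: cs, i, bal, base =>
    if c = '(' then
      isParenValidGoB cs (i + 1) (bal + 1) (if bal = 0 then i else base)
    else if c = ')' then
      if bal = 0 then (false, i) else isParenValidGoB cs (i + 1) (bal - 1) base
    else
      isParenValidGoB cs (i + 1) bal base

def isParenValid_alt (s : String) : Bool × Int :=
  isParenValidGoB s.toList 0 0 (-1)

-- ===== PRECONDITION & SPEC =====
def Spec_isParenValid (s : String) (out : Bool × Int) : Prop := out = isParenValid_alt s
instance (s : String) (out : Bool × Int) : Decidable (Spec_isParenValid s out) := by unfold Spec_isParenValid; infer_instance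

-- ===== CLAIM (what is proved, stated in full; the proofs are below) =====
def Claim_equal_isParenValid : Prop := ∀ (s : String), Dom_isParenValid s → Spec_isParenValid s (isParenValid s)

-- ===== LEMMAS AND PROOFS =====

-- invariant: A's stack holds only '(' entries; its length is B's balance and the index of its
-- bottom element is B's base (base arbitrary while the stack is empty).
theorem isParenValidGo_eq (cs : List Char) :
    ∀ (i : Int) (st : List (Char × Int)) (base : Int),
      (∀ p ∈ st, p.1 = '(') →
      (∀ p ∈ st.head?, p.2 = base) →
      isParenValidGoA cs i st = isParenValidGoB cs i (st.length : Int) base := by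
  induction cs with
  | nil =>
    intro i st base hall hhead
    cases st with
    | nil => simp [isParenValidGoA, isParenValidGoB]
    | cons p t =>
      have hp : p.2 = base := hhead p (by simp)
      have hb : (((p :: t).length : Int)) ≠ 0 := by
        simp
        omega
      simp only [isParenValidGoA, isParenValidGoB, if_neg hb, hp]
  | cons c cs ih =>
    intro i st base hall hhead
    by_cases hc : c = '('
    · rw [isParenValidGoA, isParenValidGoB, if_pos hc, if_pos hc]
      have h1 : ∀ p ∈ st ++ [(c, i)], p.1 = '(' := by
        intro p hp
        rcases List.mem_append.mp hp with h | h
        · exact hall p h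
        · simp at h; simp [h, hc]
      have h2 : ∀ p ∈ (st ++ [(c, i)]).head?,
          p.2 = (if (st.length : Int) = 0 then i else base) := by
        cases st with
        | nil => simp
        | cons q t =>
          intro p hp
          simp only [List.cons_append, List.head?_cons, Option.mem_some_iff] at hp
          have hb : (((q :: t).length : Int)) ≠ 0 := by
            simp
            omega
          rw [if_neg hb, ← hp]
          exact hhead q (by simp)
      have hrec := ih (i + 1) (st ++ [(c, i)]) _ h1 h2
      have hl : (((st ++ [(c, i)]).length : Int)) = (st.length : Int) + 1 := by
        simp
      rw [hrec, hl]
    · by_cases hc' : c = ')'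
      · cases st with
        | nil =>
          simp [isParenValidGoA, isParenValidGoB, hc']
        | cons q t =>
          have hlast : ((q :: t).getLast?) = some ((q :: t).getLast (by simp)) := by
            simp [List.getLast?_eq_some_getLast]
          have hq : ((q :: t).getLast (by simp)).1 = '(' :=
            hall _ (List.getLast_mem _)
          rw [isParenValidGoA, isParenValidGoB, if_neg hc, if_neg hc, if_pos hc', if_pos hc',
            hlast]
          simp only [hq, ne_eq, not_true_eq_false, if_false]
          have hbal : ¬ ((((q :: t).length : Int)) = 0) := by
            simp
            omega
          rw [if_neg hbal]
          have hlen : (((q :: t).dropLast.length : Int)) = ((q :: t).length : Int) - 1 := by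
            simp [List.length_dropLast]
          rw [← hlen, ih (i + 1) (q :: t).dropLast base ?_ ?_]
          · intro p hp; exact hall p (List.mem_of_mem_dropLast hp)
          · cases t with
            | nil => simp
            | cons r u =>
              intro p hp
              simp only [List.dropLast_cons₂, List.head?_cons, Option.mem_some_iff] at hp
              rw [← hp]
              exact hhead q (by simp)
      · rw [isParenValidGoA, isParenValidGoB, if_neg hc, if_neg hc, if_neg hc', if_neg hc']
        exact ih (i + 1) st base hall hhead

-- ===== VERDICT (by name: the statement is the Claim_ definition above) =====
theorem isParenValid_spec : Claim_equal_isParenValid := by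
  intro s _
  show isParenValid s = isParenValid_alt s
  unfold isParenValid isParenValid_alt
  exact isParenValidGo_eq s.toList 0 [] (-1) (by simp) (by simp)
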